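-- pv_equiv track=rewrite | github.com/Kaleido-subs/project-template | scripts/tl_memory.py | _find_brace_spans
-- ===== SOURCE A (Python) =====
-- def _find_brace_spans(text: str) -> list[tuple[int, int]]:
--     spans = []
--     i = 0
--
--     while i < len(text):
--         if text[i] != "{":
--             i += 1
--             continue
--
--         start = i
--         depth = 1
--         i += 1
--
--         while i < len(text) and depth > 0:
--             if text[i] == "{":
--                 depth += 1
--             elif text[i] == "}":
--                 depth -= 1
--
--                 if depth == 0:
--                     spans.append((start, i + 1))
--                     break
--
--             i += 1
--
--         i += 1
--
--     return spans
-- ===== SOURCE B (Python) =====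
-- def _find_brace_spans(text: str) -> list[tuple[int, int]]:
--     spans = []
--     depth = 0
--     start = 0
--     for i, ch in enumerate(text):
--         if ch == "{":
--             if depth == 0:
--                 start = i
--             depth += 1
--         elif ch == "}" and depth > 0:
--             depth -= 1
--             if depth == 0:
--                 spans.append((start, i + 1))
--     return spans
-- ===== Notes on version B (the rewrite author's own statement) =====
-- stated objective: simpler
-- what changed: Replaced A's outer-scan-plus-inner-consume nested while loops with one flat enumerate pass maintaining a depth counter and a start index.
import Mathlib
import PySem

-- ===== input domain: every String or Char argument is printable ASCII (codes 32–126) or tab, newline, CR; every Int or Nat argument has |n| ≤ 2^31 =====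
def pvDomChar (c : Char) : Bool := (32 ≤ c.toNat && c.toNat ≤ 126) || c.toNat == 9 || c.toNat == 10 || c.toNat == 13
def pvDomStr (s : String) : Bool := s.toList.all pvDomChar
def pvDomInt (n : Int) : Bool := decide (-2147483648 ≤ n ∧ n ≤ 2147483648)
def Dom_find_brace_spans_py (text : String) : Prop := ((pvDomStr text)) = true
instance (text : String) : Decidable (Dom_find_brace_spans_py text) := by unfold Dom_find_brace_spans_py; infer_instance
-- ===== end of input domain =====

-- B replaces A's nested while loops by one flat pass with a depth counter (objective: simpler).

-- ===== PORT A =====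
-- A scans the text with an index that only moves forward and never re-reads a position;
-- the port consumes the character list structurally, carrying the current index `i` for
-- the recorded spans (exact: every `text[i]` access in A happens with i < len(text)).
-- aInner is A's inner while loop: on entry depth ≥ 1 always holds (A breaks the moment
-- depth reaches 0), so the loop guard `depth > 0` is represented by the `d` parameter
-- being the true depth, and the break consumes the closing '}' (A's trailing `i += 1`).
mutual
def pvAOuter (cs : List Char) (i : Nat) : List (Int × Int) :=
  match cs with
  | [] => []
  | c :: rest =>
    if c ≠ '{' then pvAOuter rest (i + 1)
    else pvAInner rest (i + 1) i 1

def pvAInner (cs : List Char) (i : Nat) (start : Nat) (d : Nat) : List (Int × Int) :=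
  match cs with
  | [] => []
  | c :: rest =>
    if c = '{' then pvAInner rest (i + 1) start (d + 1)
    else if c = '}' then
      if d = 1 then ((start : Int), ((i : Int) + 1)) :: pvAOuter rest (i + 1)
      else pvAInner rest (i + 1) start (d - 1)
    else pvAInner rest (i + 1) start d
end

def find_brace_spans_py (text : String) : List (Int × Int) :=
  pvAOuter text.toList 0

-- ===== PORT B =====
-- state = (spans, depth, start), one fold over enumerate(text)
def pvBStep (st : List (Int × Int) × Nat × Int) (p : Int × Char) :
    List (Int × Int) × Nat × Int :=
  let (spans, depth, start) := st
  let (i, ch) := p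
  if ch = '{' then
    (spans, depth + 1, if depth = 0 then i else start)
  else if ch = '}' ∧ depth > 0 then
    if depth - 1 = 0 then (spans ++ [(start, i + 1)], depth - 1, start)
    else (spans, depth - 1, start)
  else st

def find_brace_spans_py_alt (text : String) : List (Int × Int) :=
  ((PySem.List.enumerate text.toList 0).foldl pvBStep ([], 0, 0)).1

-- ===== PRECONDITION & SPEC =====
def Spec_find_brace_spans_py (text : String) (out : List (Int × Int)) : Prop := out = find_brace_spans_py_alt text
instance (text : String) (out : List (Int × Int)) : Decidable (Spec_find_brace_spans_py text out) := by unfold Spec_find_brace_spans_py; infer_instance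

-- ===== CLAIM (what is proved, stated in full; the proofs are below) =====
def Claim_equal_find_brace_spans_py : Prop := ∀ (text : String), Dom_find_brace_spans_py text → Spec_find_brace_spans_py text (find_brace_spans_py text)

-- ===== LEMMAS AND PROOFS =====

-- Step lemmas: pvBStep on each character class.
theorem pvStep_open (spans : List (Int × Int)) (d : Nat) (start i : Int) :
    pvBStep (spans, d, start) (i, '{') = (spans, d + 1, if d = 0 then i else start) := rfl

theorem pvStep_close_zero (spans : List (Int × Int)) (start i : Int) :
    pvBStep (spans, 0, start) (i, '}') = (spans, 0, start) := by
  simp [pvBStep]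

theorem pvStep_close_one (spans : List (Int × Int)) (start i : Int) :
    pvBStep (spans, 1, start) (i, '}') = (spans ++ [(start, i + 1)], 0, start) := by
  simp [pvBStep]

theorem pvStep_close_succ (spans : List (Int × Int)) (d : Nat) (start i : Int) :
    pvBStep (spans, d + 2, start) (i, '}') = (spans, d + 1, start) := by
  simp [pvBStep]

theorem pvStep_other (spans : List (Int × Int)) (d : Nat) (start i : Int) (c : Char)
    (h1 : ¬ c = '{') (h2 : ¬ c = '}') :
    pvBStep (spans, d, start) (i, c) = (spans, d, start) := by
  simp [pvBStep, h1, h2]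

-- Combined loop invariant for B's fold vs A's two mutually recursive loops:
-- at depth 0 the fold computes spans ++ (A's outer loop); at depth d+1 it computes
-- spans ++ (A's inner loop with that depth and start).
theorem pvFold_eq (cs : List Char) :
    (∀ (i : Int) (spans : List (Int × Int)) (s0 : Int) (j : Nat), i = (j : Int) →
      ((PySem.List.enumerate cs i).foldl pvBStep (spans, 0, s0)).1 = spans ++ pvAOuter cs j) ∧
    (∀ (i : Int) (spans : List (Int × Int)) (start : Int) (d : Nat) (j : Nat) (st : Nat),
      i = (j : Int) → start = (st : Int) →
      ((PySem.List.enumerate cs i).foldl pvBStep (spans, d + 1, start)).1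
        = spans ++ pvAInner cs j st (d + 1)) := by
  induction cs with
  | nil =>
    constructor
    · intro i spans s0 j _
      simp [PySem.List.enumerate, pvAOuter]
    · intro i spans start d j st _ _
      simp [PySem.List.enumerate, pvAInner]
  | cons c rest ih =>
    obtain ⟨ihO, ihI⟩ := ih
    constructor
    · intro i spans s0 j hi
      subst hi
      rw [PySem.List.enumerate_cons, List.foldl_cons]
      by_cases hc : c = '{'
      · subst hc
        rw [pvStep_open, if_pos rfl, pvAOuter, if_neg (by simp)]
        exact ihI _ _ _ 0 (j + 1) j (by push_cast; ring) rfl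
      · by_cases hc2 : c = '}'
        · subst hc2
          rw [pvStep_close_zero, pvAOuter, if_pos (by simp)]
          exact ihO _ _ _ (j + 1) (by push_cast; ring)
        · rw [pvStep_other _ _ _ _ _ hc hc2, pvAOuter, if_pos hc]
          exact ihO _ _ _ (j + 1) (by push_cast; ring)
    · intro i spans start d j st hi hst
      subst hi hst
      rw [PySem.List.enumerate_cons, List.foldl_cons]
      by_cases hc : c = '{'
      · subst hc
        rw [pvStep_open, if_neg (by omega), pvAInner, if_pos rfl]
        exact ihI _ _ _ (d + 1) (j + 1) st (by push_cast; ring) rfl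
      · by_cases hc2 : c = '}'
        · subst hc2
          rw [pvAInner, if_neg hc, if_pos rfl]
          rcases d with _ | d'
          · rw [pvStep_close_one, if_pos rfl]
            rw [ihO ((j : Int) + 1) (spans ++ [((st : Int), (j : Int) + 1)]) (st : Int) (j + 1) (by push_cast; ring)]
            simp
          · rw [pvStep_close_succ, if_neg (by omega)]
            exact ihI _ _ _ d' (j + 1) st (by push_cast; ring) rfl
        · rw [pvStep_other _ _ _ _ _ hc hc2, pvAInner, if_neg hc, if_neg hc2]
          exact ihI _ _ _ d (j + 1) st (by push_cast; ring) rfl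

-- ===== VERDICT (by name: the statement is the Claim_ definition above) =====
theorem find_brace_spans_py_spec : Claim_equal_find_brace_spans_py := by
  intro text _
  unfold Spec_find_brace_spans_py find_brace_spans_py find_brace_spans_py_alt
  rw [(pvFold_eq text.toList).1 0 [] 0 0 rfl]
  simp
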